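-- pv_equiv track=rewrite | github.com/akriegman/Spherical-Game | python/meshGenerate.py | evenPerms
-- ===== SOURCE A (Python) =====
-- def oddPerms(l):
--     if len(l) == 1:
--         return
--     for i in range(len(l)):
--         s = l[i:i+1]
--         t = l[:i] + l[i+1:]
--         if i % 2:
--             for p in evenPerms(t):
--                 yield s + p
--         else:
--             for p in oddPerms(t):
--                 yield s + p
--
-- def evenPerms(l):
--     if len(l) == 1:
--         yield l
--         return
--     for i in range(len(l)):
--         s = l[i:i+1]
--         t = l[:i] + l[i+1:]
--         if i % 2:
--             for p in oddPerms(t):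
--                 yield s + p
--         else:
--             for p in evenPerms(t):
--                 yield s + p
-- ===== SOURCE B (Python) =====
-- # B: one recursion computes every permutation together with its parity sign;
-- # evenPerms then filters the even ones, replacing A's mutual even/odd recursion.
-- def _signedPerms(l):
--     if len(l) == 1:
--         return [(l, True)]
--     out = []
--     for i in range(len(l)):
--         s = l[i:i+1]
--         t = l[:i] + l[i+1:]
--         for p, e in _signedPerms(t):
--             out.append((s + p, e if i % 2 == 0 else not e))
--     return out
--
-- def evenPerms(l):
--     for p, e in _signedPerms(l):
--         if e:
--             yield p
-- ===== Notes on version B (the rewrite author's own statement) =====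
-- stated objective: simpler
-- what changed: A's two mutually recursive generators (evenPerms/oddPerms) are replaced by a single recursion that builds every permutation paired with its parity sign, after which evenPerms is just a filter on the sign.
import Mathlib
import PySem

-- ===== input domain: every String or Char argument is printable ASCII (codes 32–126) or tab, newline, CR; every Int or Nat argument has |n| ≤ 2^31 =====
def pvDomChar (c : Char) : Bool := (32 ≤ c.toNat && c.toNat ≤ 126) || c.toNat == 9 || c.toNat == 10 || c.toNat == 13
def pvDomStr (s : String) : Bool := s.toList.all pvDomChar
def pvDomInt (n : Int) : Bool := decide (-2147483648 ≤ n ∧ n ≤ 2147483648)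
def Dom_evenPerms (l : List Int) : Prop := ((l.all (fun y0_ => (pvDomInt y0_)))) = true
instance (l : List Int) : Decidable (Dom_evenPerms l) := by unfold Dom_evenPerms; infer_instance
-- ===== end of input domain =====

-- B replaces A's mutual even/odd recursion by ONE recursion that carries each
-- permutation's parity sign, followed by a filter (objective: simpler; no speed claim).

-- termination helper for both ports: the rest list l[:i] + l[i+1:] is strictly shorter
theorem pv_rest_len_lt (l : List Int) (i : Nat) (h : i < l.length) :
    (PySem.List.slice l none (some (i : Int)) ++
      PySem.List.slice l (some ((i : Int) + 1)) none).length < l.length := by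
  have h1 : PySem.List.slice l none (some (i : Int)) = l.take i :=
    PySem.List.slice_to_natCast l i
  have h2 : PySem.List.slice l (some ((i : Int) + 1)) none = l.drop (i + 1) := by
    have := PySem.List.slice_from_natCast l (i + 1)
    simpa [Nat.cast_add] using this
  simp [h1, h2]
  omega

-- ===== PORT A =====
mutual
def evenPerms (l : List Int) : List (List Int) :=
  if l.length = 1 then [l] else evenLoopA l 0
termination_by (l.length, 1, 0)

def evenLoopA (l : List Int) (i : Nat) : List (List Int) :=
  if h : i < l.length then
    (if i % 2 = 1 then
      (oddPermsA (PySem.List.slice l none (some (i : Int)) ++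
          PySem.List.slice l (some ((i : Int) + 1)) none)).map
        (fun p => PySem.List.slice l (some (i : Int)) (some ((i : Int) + 1)) ++ p)
    else
      (evenPerms (PySem.List.slice l none (some (i : Int)) ++
          PySem.List.slice l (some ((i : Int) + 1)) none)).map
        (fun p => PySem.List.slice l (some (i : Int)) (some ((i : Int) + 1)) ++ p))
      ++ evenLoopA l (i + 1)
  else []
termination_by (l.length, 0, l.length - i)
decreasing_by
  all_goals simp_wf
  all_goals first
    | (apply Prod.Lex.left
       have hlt := pv_rest_len_lt l i h
       simp only [PySem.List.slice_to_natCast] at hlt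
       simpa using hlt)
    | (apply Prod.Lex.right; apply Prod.Lex.right; omega)

def oddPermsA (l : List Int) : List (List Int) :=
  if l.length = 1 then [] else oddLoopA l 0
termination_by (l.length, 1, 0)

def oddLoopA (l : List Int) (i : Nat) : List (List Int) :=
  if h : i < l.length then
    (if i % 2 = 1 then
      (evenPerms (PySem.List.slice l none (some (i : Int)) ++
          PySem.List.slice l (some ((i : Int) + 1)) none)).map
        (fun p => PySem.List.slice l (some (i : Int)) (some ((i : Int) + 1)) ++ p)
    else
      (oddPermsA (PySem.List.slice l none (some (i : Int)) ++
          PySem.List.slice l (some ((i : Int) + 1)) none)).map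
        (fun p => PySem.List.slice l (some (i : Int)) (some ((i : Int) + 1)) ++ p))
      ++ oddLoopA l (i + 1)
  else []
termination_by (l.length, 0, l.length - i)
decreasing_by
  all_goals simp_wf
  all_goals first
    | (apply Prod.Lex.left
       have hlt := pv_rest_len_lt l i h
       simp only [PySem.List.slice_to_natCast] at hlt
       simpa using hlt)
    | (apply Prod.Lex.right; apply Prod.Lex.right; omega)
end

-- ===== PORT B =====
mutual
def signedPerms (l : List Int) : List (List Int × Bool) :=
  if l.length = 1 then [(l, true)] else signedLoop l 0
termination_by (l.length, 1, 0)

def signedLoop (l : List Int) (i : Nat) : List (List Int × Bool) :=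
  if h : i < l.length then
    ((signedPerms (PySem.List.slice l none (some (i : Int)) ++
        PySem.List.slice l (some ((i : Int) + 1)) none)).map
      (fun pe => (PySem.List.slice l (some (i : Int)) (some ((i : Int) + 1)) ++ pe.1,
        if i % 2 = 0 then pe.2 else !pe.2)))
      ++ signedLoop l (i + 1)
  else []
termination_by (l.length, 0, l.length - i)
decreasing_by
  all_goals simp_wf
  all_goals first
    | (apply Prod.Lex.left
       have hlt := pv_rest_len_lt l i h
       simp only [PySem.List.slice_to_natCast] at hlt
       simpa using hlt)
    | (apply Prod.Lex.right; apply Prod.Lex.right; omega)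
end

def evenPerms_alt (l : List Int) : List (List Int) :=
  ((signedPerms l).filter (fun pe => pe.2)).map (fun pe => pe.1)

-- ===== PRECONDITION & SPEC =====
def Spec_evenPerms (l : List Int) (out : List (List Int)) : Prop := out = evenPerms_alt l
instance (l : List Int) (out : List (List Int)) : Decidable (Spec_evenPerms l out) := by unfold Spec_evenPerms; infer_instance

-- ===== CLAIM (what is proved, stated in full; the proofs are below) =====
def Claim_equal_evenPerms : Prop := ∀ (l : List Int), Dom_evenPerms l → Spec_evenPerms l (evenPerms l)

-- ===== LEMMAS AND PROOFS =====

-- loop bodies agree, assuming the claim for all shorter lists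
theorem pv_loop_eq (l : List Int)
    (ih : ∀ t : List Int, t.length < l.length →
      evenPerms t = ((signedPerms t).filter (fun pe => pe.2)).map (fun pe => pe.1) ∧
      oddPermsA t = ((signedPerms t).filter (fun pe => !pe.2)).map (fun pe => pe.1)) :
    ∀ k i, l.length - i ≤ k →
      evenLoopA l i = ((signedLoop l i).filter (fun pe => pe.2)).map (fun pe => pe.1) ∧
      oddLoopA l i = ((signedLoop l i).filter (fun pe => !pe.2)).map (fun pe => pe.1) := by
  intro k
  induction k with
  | zero =>
    intro i hi
    have h : ¬ i < l.length := by omega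
    rw [evenLoopA, oddLoopA, signedLoop]
    simp [h]
  | succ k ihk =>
    intro i hi
    by_cases h : i < l.length
    · have ht := (ih _ (pv_rest_len_lt l i h))
      have hrec := ihk (i + 1) (by omega)
      simp only [PySem.List.slice_to_natCast] at ht
      rw [evenLoopA, oddLoopA, signedLoop]
      simp only [h, dif_pos, List.filter_append, List.map_append, List.filter_map,
        List.map_map]
      rcases Nat.mod_two_eq_zero_or_one i with hp | hp
      · simp [hp, ht.1, ht.2, hrec.1, hrec.2, List.map_map, Function.comp_def]
      · simp [hp, ht.1, ht.2, hrec.1, hrec.2, List.map_map, Function.comp_def]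
    · rw [evenLoopA, oddLoopA, signedLoop]
      simp [h]

theorem pv_key : ∀ (n : Nat) (l : List Int), l.length ≤ n →
    evenPerms l = ((signedPerms l).filter (fun pe => pe.2)).map (fun pe => pe.1) ∧
    oddPermsA l = ((signedPerms l).filter (fun pe => !pe.2)).map (fun pe => pe.1) := by
  intro n
  induction n with
  | zero =>
    intro l hl
    have h : ¬ l.length = 1 := by omega
    rw [evenPerms, oddPermsA, signedPerms]
    simp only [h, if_neg, not_false_iff]
    exact pv_loop_eq l (fun t ht => absurd (by omega : t.length < 0) (by omega))
      l.length 0 (by omega)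
  | succ n ihn =>
    intro l hl
    by_cases h : l.length = 1
    · rw [evenPerms, oddPermsA, signedPerms]
      simp [h]
    · rw [evenPerms, oddPermsA, signedPerms]
      simp only [h, if_neg, not_false_iff]
      exact pv_loop_eq l (fun t ht => ihn t (by omega)) l.length 0 (by omega)

-- ===== VERDICT (by name: the statement is the Claim_ definition above) =====
theorem evenPerms_spec : Claim_equal_evenPerms := by
  intro l _
  unfold Spec_evenPerms evenPerms_alt
  exact (pv_key l.length l le_rfl).1
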